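-- pv_equiv track=rewrite | github.com/hyeonjiana/household_ledger | category.py | search_category
-- ===== SOURCE A (Python) =====
-- def search_category(category_map, searchcat):
--     std_category=None
--     for key, value in category_map.items():
--         if(searchcat == key):
--             std_category=key
--         elif(searchcat in value["synonyms"]):
--             std_category=key
--     return std_category
-- ===== SOURCE B (Python) =====
-- def search_category(category_map, searchcat):
--     index = {}
--     for key, value in category_map.items():
--         index[key] = key
--         for syn in value.get("synonyms", []):
--             index[syn] = key
--     return index.get(searchcat)
-- ===== Notes on version B (the rewrite author's own statement) =====
-- stated objective: idiomatic
-- what changed: Instead of scanning every entry and testing searchcat against key and synonyms, B builds an inverted index mapping each key and each synonym to its key (later entries overwrite, preserving A's last-match tie-break) and answers with a single dict lookup.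
-- crash fix: On maps containing an entry whose key differs from searchcat and whose value has no 'synonyms' key, A raises KeyError while B (using .get) returns the result of the remaining index, e.g. None. — e.g. on search_category([("food", [("x", [])])], "snack"): A raises KeyError, B returns none
import Mathlib
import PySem

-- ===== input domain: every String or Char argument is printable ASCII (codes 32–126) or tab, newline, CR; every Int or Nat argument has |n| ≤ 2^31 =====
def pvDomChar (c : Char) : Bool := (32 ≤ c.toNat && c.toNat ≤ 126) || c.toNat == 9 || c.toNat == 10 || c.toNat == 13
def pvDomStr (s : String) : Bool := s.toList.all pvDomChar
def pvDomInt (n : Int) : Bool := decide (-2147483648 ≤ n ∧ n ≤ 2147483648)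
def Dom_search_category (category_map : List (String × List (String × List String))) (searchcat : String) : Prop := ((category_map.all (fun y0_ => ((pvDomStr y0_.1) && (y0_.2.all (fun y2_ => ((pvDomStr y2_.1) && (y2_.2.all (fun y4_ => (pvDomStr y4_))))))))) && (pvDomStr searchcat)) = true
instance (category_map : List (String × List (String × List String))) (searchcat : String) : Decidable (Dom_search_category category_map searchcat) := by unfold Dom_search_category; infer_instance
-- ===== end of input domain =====

-- B replaces A's per-entry comparison scan by an inverted index (synonym/key → key) built
-- once and queried with a single lookup; objective: idiomatic, no speed claim.

-- ===== PORT A =====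
def search_category (category_map : List (String × List (String × List String))) (searchcat : String) : Option String :=
  category_map.foldl (fun std_category kv =>
    if searchcat = kv.1 then some kv.1
    else if searchcat ∈ (PySem.Dict.ofList kv.2).getD "synonyms" [] then some kv.1
    else std_category) none

-- ===== PORT B =====
def search_category_alt (category_map : List (String × List (String × List String))) (searchcat : String) : Option String :=
  let index : PySem.Dict String String :=
    category_map.foldl (fun idx kv =>
      ((PySem.Dict.ofList kv.2).getD "synonyms" []).foldl
        (fun idx syn => idx.insert syn kv.1) (idx.insert kv.1 kv.1)) PySem.Dict.empty
  index.get? searchcat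

-- ===== PRECONDITION & SPEC =====
-- Pre_ requires distinct outer keys (a Python dict cannot carry duplicates, so this excludes
-- no real dict argument) and that every entry whose key differs from searchcat carries a
-- "synonyms" key — on entries missing it A raises KeyError.
def Pre_search_category (category_map : List (String × List (String × List String))) (searchcat : String) : Prop :=
  (category_map.map Prod.fst).Nodup ∧
  ∀ p ∈ category_map, p.1 ≠ searchcat → "synonyms" ∈ p.2.map Prod.fst
instance (category_map : List (String × List (String × List String))) (searchcat : String) : Decidable (Pre_search_category category_map searchcat) := by unfold Pre_search_category; infer_instance
def pvWitness_search_category : (List (String × List (String × List String))) × String :=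
  ([("food", [("synonyms", ["grocery", "snack"])]), ("fun", [("synonyms", ["game"])])], "snack")

-- On maps containing an entry whose key differs from searchcat and whose value has no
-- "synonyms" key, A raises KeyError while B (using .get) returns the remaining index's answer.
def Raises_search_category (category_map : List (String × List (String × List String))) (searchcat : String) : Prop :=
  ∃ p ∈ category_map, p.1 ≠ searchcat ∧ "synonyms" ∉ p.2.map Prod.fst
instance (category_map : List (String × List (String × List String))) (searchcat : String) : Decidable (Raises_search_category category_map searchcat) := by unfold Raises_search_category; infer_instance
def pvRaiseWitness_search_category : (List (String × List (String × List String))) × String :=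
  ([("food", [("x", [])])], "snack")
def pvRaiseWitnessOut_search_category : Option String := none

def Spec_search_category (category_map : List (String × List (String × List String))) (searchcat : String) (out : Option String) : Prop := out = search_category_alt category_map searchcat
instance (category_map : List (String × List (String × List String))) (searchcat : String) (out : Option String) : Decidable (Spec_search_category category_map searchcat out) := by unfold Spec_search_category; infer_instance

-- ===== CLAIM (what is proved, stated in full; the proofs are below) =====
def Claim_equal_search_category : Prop := ∀ (category_map : List (String × List (String × List String))) (searchcat : String), Dom_search_category category_map searchcat → Pre_search_category category_map searchcat → Spec_search_category category_map searchcat (search_category category_map searchcat)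
def Claim_raises_search_category : Prop := (∀ (category_map : List (String × List (String × List String))) (searchcat : String), Dom_search_category category_map searchcat → Raises_search_category category_map searchcat → ¬ Pre_search_category category_map searchcat) ∧ (Dom_search_category (pvRaiseWitness_search_category.1) (pvRaiseWitness_search_category.2) ∧ Raises_search_category (pvRaiseWitness_search_category.1) (pvRaiseWitness_search_category.2) ∧ search_category_alt (pvRaiseWitness_search_category.1) (pvRaiseWitness_search_category.2) = pvRaiseWitnessOut_search_category)

-- ===== LEMMAS AND PROOFS =====

-- the inner synonym loop: lookup after inserting every synonym ↦ key
lemma get_foldl_insert_syns (s k : String) :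
    ∀ (syns : List String) (d : PySem.Dict String String),
      (syns.foldl (fun idx syn => idx.insert syn k) d).get? s
        = if s ∈ syns then some k else d.get? s := by
  intro syns
  induction syns with
  | nil => intro d; simp
  | cons a syns ih =>
      intro d
      simp only [List.foldl_cons, ih, List.mem_cons, PySem.Dict.get?_insert]
      by_cases hmem : s ∈ syns <;> by_cases ha : s = a <;> simp [hmem, ha]

-- loop invariant: the lookup in B's partial index equals A's accumulator
lemma index_invariant (s : String) :
    ∀ (l : List (String × List (String × List String)))
      (d : PySem.Dict String String) (std : Option String),
      d.get? s = std →
      (l.foldl (fun idx kv =>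
          ((PySem.Dict.ofList kv.2).getD "synonyms" []).foldl
            (fun idx syn => idx.insert syn kv.1) (idx.insert kv.1 kv.1)) d).get? s
        = l.foldl (fun std_category kv =>
            if s = kv.1 then some kv.1
            else if s ∈ (PySem.Dict.ofList kv.2).getD "synonyms" [] then some kv.1
            else std_category) std := by
  intro l
  induction l with
  | nil => intro d std h; simpa using h
  | cons kv l ih =>
      intro d std h
      simp only [List.foldl_cons]
      apply ih
      rw [get_foldl_insert_syns, PySem.Dict.get?_insert]
      by_cases hk : s = kv.1 <;>
        by_cases hs : s ∈ (PySem.Dict.ofList kv.2).getD "synonyms" [] <;>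
        simp [hk, hs, h]

-- ===== VERDICT (by name: the statement is the Claim_ definition above) =====
theorem search_category_spec : Claim_equal_search_category := by
  intro category_map searchcat _ _
  unfold Spec_search_category search_category search_category_alt
  exact (index_invariant searchcat category_map PySem.Dict.empty none (by simp)).symm

theorem search_category_raises : Claim_raises_search_category := by
  unfold Claim_raises_search_category
  refine ⟨?_, by decide⟩
  intro category_map searchcat _ hr hpre
  obtain ⟨p, hp, hne, hmiss⟩ := hr
  exact hmiss (hpre.2 p hp hne)

-- witness self-check: the crash-fix witness facts, read off from search_category_raises
theorem pvRaiseWitness_search_category_ok :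
    Dom_search_category (pvRaiseWitness_search_category.1) (pvRaiseWitness_search_category.2) ∧
    Raises_search_category (pvRaiseWitness_search_category.1) (pvRaiseWitness_search_category.2) ∧
    search_category_alt (pvRaiseWitness_search_category.1) (pvRaiseWitness_search_category.2) = pvRaiseWitnessOut_search_category :=
  search_category_raises.2
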